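-- pv_equiv track=rewrite | github.com/greta-html-css/computational-thinking-week-group-besties | challenge_day2/station5.py | solution_station_5
-- ===== SOURCE A (Python) =====
-- def solution_station_5(n):
--     learning_teams = {
--         "1": ["Daeho, David, Kaisa, Oliver, Sara, Dan, Ivar, Lotte, Riya, Vassil, Twan, Ester, Karolina, Lena, Margarita, Anna, Kien, Klaudia, Maliah, Todd"],
--         "2": ["Oumaima, Mathilde, Marie, Anita, Ziyan, Bernardo, Eleanor, Lorijn, Maria, Younes, Yvan, Henning, Liangyu, Maciej, Toprak, Chris, GengXin, Mingze, Phoebe"],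
--         "3": ["Betija, Haider, Kacper, Sophie, Amir, Baltasar, Isar, Jelle, Nicolas, David, Ipek, Juan, Marfa, Maria, Alissa, Leopoldo, Mies, Jiaying, Kaixin, Mai, Sem, Tibbe"],
--         "4": ["Justus, Julia, Philip, Uli, Vanessa, Anna, Ekaterina, Thessa, Tongfei, Yang, Benedikt, Jan, Nadee, Osjah, Tim, Eliana, Joana, Peilin, Pija, Wenhao"],
--         "5": ["Afua, Cristina, Greta, Jace, Laura, Anna, Bassant, Ivan, Juriaan, Kiavash"],
--         "6": ["Keitaro, Nohemi, Norina, Yifan, Yinan, Luo, Nikola, Olesya, Sophie, Tom"]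
--
--     }
--
--     name_to_teams = {}
--     for team, names_list in learning_teams.items():
--         for names_str in names_list:
--             for name in [n.strip() for n in names_str.split(",")]:
--                 name_to_teams[name] = int(team)
--
--     return name_to_teams.get(n, -1)
-- ===== SOURCE B (Python) =====
-- def solution_station_5(n):
--     teams = [
--         "Daeho, David, Kaisa, Oliver, Sara, Dan, Ivar, Lotte, Riya, Vassil, Twan, Ester, Karolina, Lena, Margarita, Anna, Kien, Klaudia, Maliah, Todd",
--         "Oumaima, Mathilde, Marie, Anita, Ziyan, Bernardo, Eleanor, Lorijn, Maria, Younes, Yvan, Henning, Liangyu, Maciej, Toprak, Chris, GengXin, Mingze, Phoebe",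
--         "Betija, Haider, Kacper, Sophie, Amir, Baltasar, Isar, Jelle, Nicolas, David, Ipek, Juan, Marfa, Maria, Alissa, Leopoldo, Mies, Jiaying, Kaixin, Mai, Sem, Tibbe",
--         "Justus, Julia, Philip, Uli, Vanessa, Anna, Ekaterina, Thessa, Tongfei, Yang, Benedikt, Jan, Nadee, Osjah, Tim, Eliana, Joana, Peilin, Pija, Wenhao",
--         "Afua, Cristina, Greta, Jace, Laura, Anna, Bassant, Ivan, Juriaan, Kiavash",
--         "Keitaro, Nohemi, Norina, Yifan, Yinan, Luo, Nikola, Olesya, Sophie, Tom",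
--     ]
--     for i, names in enumerate(teams, start=1):
--         if n in [x.strip() for x in names.split(",")]:
--             return i
--     return -1
-- ===== Notes on version B (the rewrite author's own statement) =====
-- stated objective: simpler
-- what changed: B replaces the dict-of-dicts plus name-to-team index build with a plain list of name strings scanned once, returning the 1-based position of the first team containing the name; Pre_ excludes the four names that appear in more than one team (Anna, David, Maria, Sophie), where A's last-write-wins dict reinsertion and B's first-match are both defensible choices no one specified.
-- outside the precondition, e.g. on solution_station_5('Anna'): A returns 5, B returns 1; on solution_station_5('David'): A returns 3, B returns 1; on solution_station_5('Maria'): A returns 3, B returns 2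
import Mathlib
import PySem

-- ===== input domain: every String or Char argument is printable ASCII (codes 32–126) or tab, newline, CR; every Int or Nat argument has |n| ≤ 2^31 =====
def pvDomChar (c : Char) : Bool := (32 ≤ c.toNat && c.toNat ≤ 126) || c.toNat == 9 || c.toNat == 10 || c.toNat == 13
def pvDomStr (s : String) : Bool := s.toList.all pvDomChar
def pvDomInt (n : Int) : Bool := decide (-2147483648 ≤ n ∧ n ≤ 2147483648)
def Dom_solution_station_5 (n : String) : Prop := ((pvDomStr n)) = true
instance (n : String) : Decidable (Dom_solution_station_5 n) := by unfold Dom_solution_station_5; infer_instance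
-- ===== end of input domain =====

-- B drops the dict build and scans a plain list of team name strings once, returning
-- the 1-based position of the first team containing the name (objective: simpler).

-- ===== PORT A =====
def teamsA : List (String × List String) := [
  ("1", ["Daeho, David, Kaisa, Oliver, Sara, Dan, Ivar, Lotte, Riya, Vassil, Twan, Ester, Karolina, Lena, Margarita, Anna, Kien, Klaudia, Maliah, Todd"]),
  ("2", ["Oumaima, Mathilde, Marie, Anita, Ziyan, Bernardo, Eleanor, Lorijn, Maria, Younes, Yvan, Henning, Liangyu, Maciej, Toprak, Chris, GengXin, Mingze, Phoebe"]),
  ("3", ["Betija, Haider, Kacper, Sophie, Amir, Baltasar, Isar, Jelle, Nicolas, David, Ipek, Juan, Marfa, Maria, Alissa, Leopoldo, Mies, Jiaying, Kaixin, Mai, Sem, Tibbe"]),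
  ("4", ["Justus, Julia, Philip, Uli, Vanessa, Anna, Ekaterina, Thessa, Tongfei, Yang, Benedikt, Jan, Nadee, Osjah, Tim, Eliana, Joana, Peilin, Pija, Wenhao"]),
  ("5", ["Afua, Cristina, Greta, Jace, Laura, Anna, Bassant, Ivan, Juriaan, Kiavash"]),
  ("6", ["Keitaro, Nohemi, Norina, Yifan, Yinan, Luo, Nikola, Olesya, Sophie, Tom"])]

-- int(team): every team key is a literal digit string, so int() never raises; the
-- .getD 0 default is unreachable.
def solution_station_5 (n : String) : Int :=
  let name_to_teams :=
    teamsA.foldl (fun d tn =>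
      tn.2.foldl (fun d names_str =>
        ((((PySem.Str.split? names_str ",").getD []).map PySem.Str.strip)).foldl
          (fun d name => d.insert name ((PySem.Int.ofStr? tn.1).getD 0)) d) d)
      PySem.Dict.empty
  name_to_teams.getD n (-1)

-- ===== PORT B =====
def teamsB : List String := [
  "Daeho, David, Kaisa, Oliver, Sara, Dan, Ivar, Lotte, Riya, Vassil, Twan, Ester, Karolina, Lena, Margarita, Anna, Kien, Klaudia, Maliah, Todd",
  "Oumaima, Mathilde, Marie, Anita, Ziyan, Bernardo, Eleanor, Lorijn, Maria, Younes, Yvan, Henning, Liangyu, Maciej, Toprak, Chris, GengXin, Mingze, Phoebe",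
  "Betija, Haider, Kacper, Sophie, Amir, Baltasar, Isar, Jelle, Nicolas, David, Ipek, Juan, Marfa, Maria, Alissa, Leopoldo, Mies, Jiaying, Kaixin, Mai, Sem, Tibbe",
  "Justus, Julia, Philip, Uli, Vanessa, Anna, Ekaterina, Thessa, Tongfei, Yang, Benedikt, Jan, Nadee, Osjah, Tim, Eliana, Joana, Peilin, Pija, Wenhao",
  "Afua, Cristina, Greta, Jace, Laura, Anna, Bassant, Ivan, Juriaan, Kiavash",
  "Keitaro, Nohemi, Norina, Yifan, Yinan, Luo, Nikola, Olesya, Sophie, Tom"]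

-- the 'for i, names in enumerate(teams, start=1): if n in …: return i' loop of Source B
def altLoop (n : String) (i : Int) : List String → Int
  | [] => -1
  | names :: rest =>
      if (((PySem.Str.split? names ",").getD []).map PySem.Str.strip).contains n
      then i
      else altLoop n (i + 1) rest

def solution_station_5_alt (n : String) : Int := altLoop n 1 teamsB

-- ===== PRECONDITION & SPEC =====
-- Pre_ excludes the four names that occur in more than one team (Anna, David, Maria,
-- Sophie): there A's value (last team, via accidental dict reinsertion order) and B's
-- (first team) are both defensible choices no one specified.
def Pre_solution_station_5 (n : String) : Prop :=
  n ≠ "Anna" ∧ n ≠ "David" ∧ n ≠ "Maria" ∧ n ≠ "Sophie"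
instance (n : String) : Decidable (Pre_solution_station_5 n) := by unfold Pre_solution_station_5; infer_instance
def pvWitness_solution_station_5 : String := "Greta"

def Spec_solution_station_5 (n : String) (out : Int) : Prop := out = solution_station_5_alt n
instance (n : String) (out : Int) : Decidable (Spec_solution_station_5 n out) := by unfold Spec_solution_station_5; infer_instance

-- ===== CLAIM (what is proved, stated in full; the proofs are below) =====
def Claim_equal_solution_station_5 : Prop := ∀ (n : String), Dom_solution_station_5 n → Pre_solution_station_5 n → Spec_solution_station_5 n (solution_station_5 n)

-- ===== LEMMAS AND PROOFS =====

/-- first-match association lookup with default -1 -/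
def pvLookup : List (String × Int) → String → Int
  | [], _ => -1
  | (k, v) :: r, n => if k == n then v else pvLookup r n

/-- the final contents of A's dict, in insertion order -/
def pvLA : List (String × Int) := [("Daeho", 1), ("David", 3), ("Kaisa", 1), ("Oliver", 1), ("Sara", 1), ("Dan", 1), ("Ivar", 1), ("Lotte", 1), ("Riya", 1), ("Vassil", 1), ("Twan", 1), ("Ester", 1), ("Karolina", 1), ("Lena", 1), ("Margarita", 1), ("Anna", 5), ("Kien", 1), ("Klaudia", 1), ("Maliah", 1), ("Todd", 1), ("Oumaima", 2), ("Mathilde", 2), ("Marie", 2), ("Anita", 2), ("Ziyan", 2), ("Bernardo", 2), ("Eleanor", 2), ("Lorijn", 2), ("Maria", 3), ("Younes", 2), ("Yvan", 2), ("Henning", 2), ("Liangyu", 2), ("Maciej", 2), ("Toprak", 2), ("Chris", 2), ("GengXin", 2), ("Mingze", 2), ("Phoebe", 2), ("Betija", 3), ("Haider", 3), ("Kacper", 3), ("Sophie", 6), ("Amir", 3), ("Baltasar", 3), ("Isar", 3), ("Jelle", 3), ("Nicolas", 3), ("Ipek", 3), ("Juan", 3), ("Marfa", 3), ("Alissa",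 3), ("Leopoldo", 3), ("Mies", 3), ("Jiaying", 3), ("Kaixin", 3), ("Mai", 3), ("Sem", 3), ("Tibbe", 3), ("Justus", 4), ("Julia", 4), ("Philip", 4), ("Uli", 4), ("Vanessa", 4), ("Ekaterina", 4), ("Thessa", 4), ("Tongfei", 4), ("Yang", 4), ("Benedikt", 4), ("Jan", 4), ("Nadee", 4), ("Osjah", 4), ("Tim", 4), ("Eliana", 4), ("Joana", 4), ("Peilin", 4), ("Pija", 4), ("Wenhao", 4), ("Afua", 5), ("Cristina", 5), ("Greta", 5), ("Jace", 5), ("Laura", 5), ("Bassant", 5), ("Ivan", 5), ("Juriaan", 5), ("Kiavash", 5), ("Keitaro", 6), ("Nohemi", 6), ("Norina", 6), ("Yifan", 6), ("Yinan", 6), ("Luo", 6), ("Nikola", 6), ("Olesya", 6), ("Tom", 6)]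

/-- B's teams flattened forward to (name, 1-based team index) pairs -/
def pvLB : List (String × Int) := [("Daeho", 1), ("David", 1), ("Kaisa", 1), ("Oliver", 1), ("Sara", 1), ("Dan", 1), ("Ivar", 1), ("Lotte", 1), ("Riya", 1), ("Vassil", 1), ("Twan", 1), ("Ester", 1), ("Karolina", 1), ("Lena", 1), ("Margarita", 1), ("Anna", 1), ("Kien", 1), ("Klaudia", 1), ("Maliah", 1), ("Todd", 1), ("Oumaima", 2), ("Mathilde", 2), ("Marie", 2), ("Anita", 2), ("Ziyan", 2), ("Bernardo", 2), ("Eleanor", 2), ("Lorijn", 2), ("Maria", 2), ("Younes", 2), ("Yvan", 2), ("Henning", 2), ("Liangyu", 2), ("Maciej", 2), ("Toprak", 2), ("Chris", 2), ("GengXin", 2), ("Mingze", 2), ("Phoebe", 2), ("Betija", 3), ("Haider", 3), ("Kacper", 3), ("Sophie", 3), ("Amir", 3), ("Baltasar", 3), ("Isar", 3), ("Jelle", 3), ("Nicolas", 3), ("David", 3), ("Ipek", 3), ("Juan", 3), ("Marfa", 3), ("Maria", 3), ("Alissa", 3), ("Leopoldo", 3), ("Mies", 3), ("Jiaying", 3),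 ("Kaixin", 3), ("Mai", 3), ("Sem", 3), ("Tibbe", 3), ("Justus", 4), ("Julia", 4), ("Philip", 4), ("Uli", 4), ("Vanessa", 4), ("Anna", 4), ("Ekaterina", 4), ("Thessa", 4), ("Tongfei", 4), ("Yang", 4), ("Benedikt", 4), ("Jan", 4), ("Nadee", 4), ("Osjah", 4), ("Tim", 4), ("Eliana", 4), ("Joana", 4), ("Peilin", 4), ("Pija", 4), ("Wenhao", 4), ("Afua", 5), ("Cristina", 5), ("Greta", 5), ("Jace", 5), ("Laura", 5), ("Anna", 5), ("Bassant", 5), ("Ivan", 5), ("Juriaan", 5), ("Kiavash", 5), ("Keitaro", 6), ("Nohemi", 6), ("Norina", 6), ("Yifan", 6), ("Yinan", 6), ("Luo", 6), ("Nikola", 6), ("Olesya", 6), ("Sophie", 6), ("Tom", 6)]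

def pvNames (s : String) : List String :=
  ((PySem.Str.split? s ",").getD []).map PySem.Str.strip

def pvFlatI (i : Int) : List String → List (String × Int)
  | [] => []
  | s :: r => (pvNames s).map (fun x => (x, i)) ++ pvFlatI (i + 1) r

theorem pvGetD_eq_lookup (l : List (String × Int)) (n : String) :
    (PySem.Dict.mk l).getD n (-1) = pvLookup l n := by
  induction l with
  | nil => simp [PySem.Dict.getD, PySem.Dict.get?, pvLookup]
  | cons p r ih =>
    obtain ⟨k, v⟩ := p
    rw [PySem.Dict.getD_eq_get?_getD, PySem.Dict.get?_mk_cons]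
    rw [PySem.Dict.getD_eq_get?_getD] at ih
    simp only [pvLookup]
    by_cases h : k == n
    · simp [h]
    · simp only [h] at *; simp [ih]

theorem pvLookup_map_append (ns : List String) (v : Int) (r : List (String × Int)) (n : String) :
    pvLookup (ns.map (fun x => (x, v)) ++ r) n = if ns.contains n then v else pvLookup r n := by
  induction ns with
  | nil => simp
  | cons x xs ih =>
    simp only [List.map_cons, List.cons_append, pvLookup, List.contains_cons, ih]
    by_cases h : x == n
    · simp [h]
      intro e _
      exact (e (beq_iff_eq.mp h).symm).elim
    · have hx : ¬ n = x := fun e => by subst e; simp at h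
      simp [h, hx]

theorem pvAlt_eq_lookup (n : String) (i : Int) (ts : List String) :
    altLoop n i ts = pvLookup (pvFlatI i ts) n := by
  induction ts generalizing i with
  | nil => simp [altLoop, pvFlatI, pvLookup]
  | cons s r ih =>
    simp only [altLoop, pvFlatI]
    rw [pvLookup_map_append]
    show (if (pvNames s).contains n then i else altLoop n (i+1) r) = _
    split
    · rfl
    · exact ih (i + 1)

theorem pvLookup_neg (l : List (String × Int)) (n : String)
    (h : ∀ p ∈ l, p.1 ≠ n) : pvLookup l n = -1 := by
  induction l with
  | nil => rfl
  | cons p r ih =>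
    obtain ⟨k, v⟩ := p
    simp only [pvLookup]
    have hk : k ≠ n := h (k, v) (List.mem_cons_self ..)
    simp only [beq_eq_false_iff_ne.mpr hk]
    exact ih (fun q hq => h q (List.mem_cons_of_mem _ hq))

set_option maxRecDepth 100000 in
set_option maxHeartbeats 4000000 in
theorem pvA_eq (n : String) : solution_station_5 n = pvLookup pvLA n := by
  have hd : (teamsA.foldl (fun d tn =>
      tn.2.foldl (fun d names_str =>
        ((((PySem.Str.split? names_str ",").getD []).map PySem.Str.strip)).foldl
          (fun d name => d.insert name ((PySem.Int.ofStr? tn.1).getD 0)) d) d)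
      PySem.Dict.empty) = PySem.Dict.mk pvLA := by decide
  show (teamsA.foldl _ PySem.Dict.empty).getD n (-1) = _
  rw [hd, pvGetD_eq_lookup]

set_option maxRecDepth 100000 in
theorem pvB_eq (n : String) : solution_station_5_alt n = pvLookup pvLB n := by
  have hf : pvFlatI 1 teamsB = pvLB := by decide
  show altLoop n 1 teamsB = _
  rw [pvAlt_eq_lookup, hf]

set_option maxRecDepth 100000 in
set_option maxHeartbeats 4000000 in
theorem pvMain (n : String) (hp : Pre_solution_station_5 n) :
    pvLookup pvLA n = pvLookup pvLB n := by
  by_cases h : n ∈ pvLA.map Prod.fst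
  · revert hp
    unfold Pre_solution_station_5
    fin_cases h <;> decide
  · rw [pvLookup_neg pvLA n, pvLookup_neg pvLB n]
    · intro p hp' hn
      have hsub : ∀ x ∈ pvLB.map Prod.fst, x ∈ pvLA.map Prod.fst := by decide
      exact h (hsub n (hn ▸ List.mem_map_of_mem hp'))
    · intro p hp' hn
      exact h (hn ▸ List.mem_map_of_mem hp')

-- ===== VERDICT (by name: the statement is the Claim_ definition above) =====
theorem solution_station_5_spec : Claim_equal_solution_station_5 := by
  intro n _ hp
  unfold Spec_solution_station_5
  rw [pvA_eq, pvB_eq, pvMain n hp]
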